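-- pv_equiv track=rewrite | github.com/StefanAndjelko/RINSproject | install/dis_tutorial6/lib/dis_tutorial6/detect_rings.py | check_in_line
-- ===== SOURCE A (Python) =====
-- def check_in_line(green_image):
--     counter = 0
--     for line in green_image:
--         found_green = False
--         found_black = False
--         for x in line:
--             if x[1] != 0 and not found_green:
--                 found_green = True
--             elif x[1] == 0 and found_green:
--                 found_black = True
--             elif x[1] != 0 and found_black:
--                 counter += 1
--         if counter > 30:
--             return True
--
--     return False
-- ===== SOURCE B (Python) =====
-- def _row_greens(line):
--     # greens strictly after the first black that follows the first green
--     vals = [x[1] != 0 for x in line]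
--     if True not in vals:
--         return 0
--     rest = vals[vals.index(True) + 1:]
--     if False not in rest:
--         return 0
--     return sum(rest[rest.index(False) + 1:])
--
--
-- def check_in_line(green_image):
--     total = 0
--     for line in green_image:
--         total += _row_greens(line)
--         if total > 30:
--             return True
--     return False
-- ===== Notes on version B (the rewrite author's own statement) =====
-- stated objective: alternative
-- what changed: Replaced the per-row two-flag state machine with a phase decomposition: map each row to a boolean green-mask, locate the first green and the first black after it with index/slicing, and sum the greens after that black; the outer loop only accumulates and threshold-checks.
import Mathlib
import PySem

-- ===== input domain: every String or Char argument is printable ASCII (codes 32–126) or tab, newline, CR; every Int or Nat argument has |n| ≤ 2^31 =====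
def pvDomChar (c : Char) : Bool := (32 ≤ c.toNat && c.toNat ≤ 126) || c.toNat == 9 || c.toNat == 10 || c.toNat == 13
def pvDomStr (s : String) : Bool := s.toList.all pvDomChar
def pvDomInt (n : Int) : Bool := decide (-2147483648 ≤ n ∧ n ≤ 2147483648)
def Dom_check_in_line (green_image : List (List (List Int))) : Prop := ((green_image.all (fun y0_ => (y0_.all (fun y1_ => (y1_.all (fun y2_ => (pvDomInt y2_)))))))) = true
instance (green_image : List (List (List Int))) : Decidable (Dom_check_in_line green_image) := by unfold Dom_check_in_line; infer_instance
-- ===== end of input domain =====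

-- B replaces A's per-row two-flag state machine by a phase decomposition (first green, first black after it, count greens after that); same cost, different structure.

-- ===== PORT A =====
-- one step of A's inner loop over a row; state = (counter, found_green, found_black); x[1] via pyGet? (in range on Pre_)
def aStep (st : Int × Bool × Bool) (x : List Int) : Int × Bool × Bool :=
  let v := (PySem.List.pyGet? x 1).getD 0
  if v ≠ 0 ∧ st.2.1 = false then (st.1, true, st.2.2)
  else if v = 0 ∧ st.2.1 = true then (st.1, st.2.1, true)
  else if v ≠ 0 ∧ st.2.2 = true then (st.1 + 1, st.2.1, st.2.2)
  else st

-- A's outer loop: fold each row from (counter, False, False), early-return when counter > 30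
def check_in_line_aux : List (List (List Int)) → Int → Bool
  | [], _ => false
  | line :: rest, counter =>
    let s := line.foldl aStep (counter, false, false)
    if s.1 > 30 then true else check_in_line_aux rest s.1

def check_in_line (green_image : List (List (List Int))) : Bool :=
  check_in_line_aux green_image 0

-- ===== PORT B =====
-- phases on the boolean green-mask of a row: first True, first False after it, count of True after that
def gcount (vals : List Bool) : Int :=
  if true ∈ vals then
    let rest := vals.drop (vals.idxOf true + 1)
    if false ∈ rest then
      ((rest.drop (rest.idxOf false + 1)).count true : Int)
    else 0
  else 0

def rowGreens (line : List (List Int)) : Int :=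
  gcount (line.map (fun x => decide ((PySem.List.pyGet? x 1).getD 0 ≠ 0)))

def check_in_line_alt_aux : List (List (List Int)) → Int → Bool
  | [], _ => false
  | line :: rest, total =>
    let t := total + rowGreens line
    if t > 30 then true else check_in_line_alt_aux rest t

def check_in_line_alt (green_image : List (List (List Int))) : Bool :=
  check_in_line_alt_aux green_image 0

-- ===== PRECONDITION & SPEC =====
-- Pre_ excludes exactly the inputs where Python A raises IndexError: a pixel with fewer than 2 channels.
def Pre_check_in_line (green_image : List (List (List Int))) : Prop :=
  ∀ line ∈ green_image, ∀ x ∈ line, 2 ≤ x.length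
instance (green_image : List (List (List Int))) : Decidable (Pre_check_in_line green_image) := by unfold Pre_check_in_line; infer_instance
def pvWitness_check_in_line : List (List (List Int)) := [[[0, 1], [0, 0], [0, 2]]]

def Spec_check_in_line (green_image : List (List (List Int))) (out : Bool) : Prop := out = check_in_line_alt green_image
instance (green_image : List (List (List Int))) (out : Bool) : Decidable (Spec_check_in_line green_image out) := by unfold Spec_check_in_line; infer_instance

-- ===== CLAIM (what is proved, stated in full; the proofs are below) =====
def Claim_equal_check_in_line : Prop := ∀ (green_image : List (List (List Int))), Dom_check_in_line green_image → Pre_check_in_line green_image → Spec_check_in_line green_image (check_in_line green_image)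

-- ===== LEMMAS AND PROOFS =====

-- A's step depends on the pixel only through its green-mask bit
def bStep (st : Int × Bool × Bool) (g : Bool) : Int × Bool × Bool :=
  if g = true ∧ st.2.1 = false then (st.1, true, st.2.2)
  else if g = false ∧ st.2.1 = true then (st.1, st.2.1, true)
  else if g = true ∧ st.2.2 = true then (st.1 + 1, st.2.1, st.2.2)
  else st

theorem aStep_eq_bStep (st : Int × Bool × Bool) (x : List Int) :
    aStep st x = bStep st (decide ((PySem.List.pyGet? x 1).getD 0 ≠ 0)) := by
  simp only [aStep, bStep]
  by_cases h : (PySem.List.pyGet? x 1).getD 0 = 0 <;> simp [h]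

theorem foldl_bStep_TT (bs : List Bool) (c : Int) :
    bs.foldl bStep (c, true, true) = (c + bs.count true, true, true) := by
  induction bs generalizing c with
  | nil => simp
  | cons b bs ih =>
    cases b <;> simp [List.foldl_cons, bStep, ih] <;> ring_nf

theorem foldl_bStep_TF (bs : List Bool) (c : Int) :
    bs.foldl bStep (c, true, false) =
      if false ∈ bs then (c + ((bs.drop (bs.idxOf false + 1)).count true : Int), true, true)
      else (c, true, false) := by
  induction bs generalizing c with
  | nil => simp
  | cons b bs ih =>
    cases b with
    | false =>
      simp [List.foldl_cons, bStep, foldl_bStep_TT]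
    | true =>
      simp only [List.foldl_cons, bStep]
      simp [ih]

theorem foldl_bStep_FF (bs : List Bool) (c : Int) :
    (bs.foldl bStep (c, false, false)).1 = c + gcount bs := by
  induction bs generalizing c with
  | nil => simp [gcount]
  | cons b bs ih =>
    cases b with
    | false =>
      have hstep : bStep (c, false, false) false = (c, false, false) := by simp [bStep]
      rw [List.foldl_cons, hstep, ih]
      congr 1
      simp only [gcount, List.mem_cons, List.idxOf_cons]
      by_cases h : true ∈ bs <;> simp [h]
    | true =>
      have hstep : bStep (c, false, false) true = (c, true, false) := by simp [bStep]
      rw [List.foldl_cons, hstep, foldl_bStep_TF]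
      simp only [gcount, List.mem_cons, List.idxOf_cons_self]
      by_cases h : false ∈ bs <;> simp [h]

theorem foldl_aStep_fst (line : List (List Int)) (c : Int) :
    (line.foldl aStep (c, false, false)).1 = c + rowGreens line := by
  have h : line.foldl aStep (c, false, false) =
      (line.map (fun x => decide ((PySem.List.pyGet? x 1).getD 0 ≠ 0))).foldl bStep (c, false, false) := by
    rw [List.foldl_map]
    apply PySem.List.foldl_congr_mem
    intro acc x _
    exact aStep_eq_bStep acc x
  rw [h, rowGreens]
  exact foldl_bStep_FF _ c

theorem aux_eq (rows : List (List (List Int))) (c : Int) :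
    check_in_line_aux rows c = check_in_line_alt_aux rows c := by
  induction rows generalizing c with
  | nil => rfl
  | cons line rest ih =>
    simp only [check_in_line_aux, check_in_line_alt_aux, foldl_aStep_fst, ih]

-- ===== VERDICT (by name: the statement is the Claim_ definition above) =====
theorem check_in_line_spec : Claim_equal_check_in_line := by
  intro gi _ _
  unfold Spec_check_in_line check_in_line check_in_line_alt
  exact aux_eq gi 0
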